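-- pv_equiv track=rewrite | github.com/NEvans85/algorithms | codefights/bestFitBox.py | packageBoxing
-- ===== SOURCE A (Python) =====
-- def packageBoxing(pkg, boxes):
--     sortedPDims = sorted(pkg)
--     fits = [box for box in boxes if all([sortedPDims[idx] <= bDim for idx, bDim in enumerate(sorted(box))])]
--     if len(fits) == 0:
--         return -1
--     elif len(fits) == 1:
--         return boxes.index(fits[0])
--     else:
--         minVolume = fits[0][0] * fits[0][1] * fits[0][2]
--         minVIdx = 0
--         for i in range(1, len(fits)):
--             volume = fits[i][0] * fits[i][1] * fits[i][2]
--             if volume < minVolume: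
--                 minVolume = volume
--                 minVIdx = i
--         return boxes.index(fits[minVIdx])
-- ===== SOURCE B (Python) =====
-- def packageBoxing(pkg, boxes):
--     sp = sorted(pkg)
--     best = -1
--     bestVol = None
--     for i, box in enumerate(boxes):
--         if all(a <= b for a, b in zip(sp, sorted(box))):
--             vol = box[0] * box[1] * box[2]
--             if bestVol is None or vol < bestVol:
--                 best, bestVol = i, vol
--     return best
-- ===== Notes on version B (the rewrite author's own statement) =====
-- stated objective: simpler
-- what changed: Replaces A's build-a-fits-list, three-way length cases, separate min-volume loop and boxes.index re-lookup by a single enumerate pass keeping a running best index and best volume.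
-- outside the precondition, e.g. on packageBoxing([1, 2], [[3]]): A returns 0, B raises IndexError
import Mathlib
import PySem

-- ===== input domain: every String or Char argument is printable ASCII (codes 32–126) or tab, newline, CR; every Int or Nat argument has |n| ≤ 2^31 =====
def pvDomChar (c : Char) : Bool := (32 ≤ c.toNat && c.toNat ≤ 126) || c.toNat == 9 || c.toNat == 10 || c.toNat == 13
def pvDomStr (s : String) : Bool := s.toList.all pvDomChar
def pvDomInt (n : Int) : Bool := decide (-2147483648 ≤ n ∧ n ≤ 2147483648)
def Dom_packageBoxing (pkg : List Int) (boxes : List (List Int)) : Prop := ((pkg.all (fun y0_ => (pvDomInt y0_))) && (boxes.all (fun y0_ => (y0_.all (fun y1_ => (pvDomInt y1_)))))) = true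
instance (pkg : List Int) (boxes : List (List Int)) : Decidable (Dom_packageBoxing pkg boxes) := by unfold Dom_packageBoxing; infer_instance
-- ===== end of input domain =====

-- B: one pass with a running best index/volume instead of A's fits-list + length cases + min loop + boxes.index re-lookup.

-- helpers shared by port B and Pre_ (box volume; B's elementwise fit test over sorted dims)
def pvVol (box : List Int) : Int :=
  PySem.List.pyGetD box 0 0 * PySem.List.pyGetD box 1 0 * PySem.List.pyGetD box 2 0

def pvFitB (sp box : List Int) : Bool :=
  (sp.zip (PySem.List.sorted box (fun x => x) false)).all (fun q => decide (q.1 ≤ q.2))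

-- ===== PORT A =====
-- pyGetD defaults are never consulted under Pre_packageBoxing (all indices are in range there).
def packageBoxing (pkg : List Int) (boxes : List (List Int)) : Int :=
  let sortedPDims := PySem.List.sorted pkg (fun x => x) false
  let fits := boxes.filter (fun box =>
    (PySem.List.enumerate (PySem.List.sorted box (fun x => x) false) 0).all
      (fun p => decide (PySem.List.pyGetD sortedPDims p.1 0 ≤ p.2)))
  if fits.length = 0 then -1
  else if fits.length = 1 then
    (((PySem.List.index? boxes (PySem.List.pyGetD fits 0 [])).getD 0 : Nat) : Int)
  else
    let f0 := PySem.List.pyGetD fits 0 []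
    let st := (PySem.List.pyRange 1 (fits.length : Int) 1).foldl
      (fun (s : Int × Int) i =>
        let fi := PySem.List.pyGetD fits i []
        let volume := PySem.List.pyGetD fi 0 0 * PySem.List.pyGetD fi 1 0 * PySem.List.pyGetD fi 2 0
        if volume < s.1 then (volume, i) else s)
      (PySem.List.pyGetD f0 0 0 * PySem.List.pyGetD f0 1 0 * PySem.List.pyGetD f0 2 0, 0)
    (((PySem.List.index? boxes (PySem.List.pyGetD fits st.2 [])).getD 0 : Nat) : Int)

-- ===== PORT B =====
def packageBoxing_alt (pkg : List Int) (boxes : List (List Int)) : Int :=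
  let sp := PySem.List.sorted pkg (fun x => x) false
  let st := (PySem.List.enumerate boxes 0).foldl
    (fun (s : Int × Option Int) p =>
      if pvFitB sp p.2 then
        let vol := pvVol p.2
        match s.2 with
        | none => (p.1, some vol)
        | some w => if vol < w then (p.1, some vol) else s
      else s)
    (-1, none)
  st.1

-- ===== PRECONDITION & SPEC =====
-- Pre_ excludes inputs where some box has more dims than pkg (A raises IndexError in the fit
-- comprehension) and inputs where some fitting box has fewer than 3 dims (the volume access
-- box[0]*box[1]*box[2] raises in A's min loop and in B; A happens to return without it only
-- when that short box is the single fit, and B raises there).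
def Pre_packageBoxing (pkg : List Int) (boxes : List (List Int)) : Prop :=
  ∀ box ∈ boxes, box.length ≤ pkg.length ∧
    (pvFitB (PySem.List.sorted pkg (fun x => x) false) box = true → 3 ≤ box.length)

instance (pkg : List Int) (boxes : List (List Int)) : Decidable (Pre_packageBoxing pkg boxes) := by
  unfold Pre_packageBoxing; infer_instance

def pvWitness_packageBoxing : List Int × List (List Int) := ([1, 2, 3], [[2, 3, 4], [1, 1, 1], [3, 3, 3]])

def Spec_packageBoxing (pkg : List Int) (boxes : List (List Int)) (out : Int) : Prop := out = packageBoxing_alt pkg boxes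
instance (pkg : List Int) (boxes : List (List Int)) (out : Int) : Decidable (Spec_packageBoxing pkg boxes out) := by unfold Spec_packageBoxing; infer_instance

-- ===== CLAIM (what is proved, stated in full; the proofs are below) =====
def Claim_equal_packageBoxing : Prop := ∀ (pkg : List Int) (boxes : List (List Int)), Dom_packageBoxing pkg boxes → Pre_packageBoxing pkg boxes → Spec_packageBoxing pkg boxes (packageBoxing pkg boxes)

-- ===== LEMMAS AND PROOFS =====

-- proof-only definitions
def pvCands (sp : List Int) (boxes : List (List Int)) : List (Int × List Int) :=
  (PySem.List.enumerate boxes 0).filter (fun p => pvFitB sp p.2)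

def pvG (s : Int × Option Int) (p : Int × List Int) : Int × Option Int :=
  let vol := pvVol p.2
  match s.2 with
  | none => (p.1, some vol)
  | some w => if vol < w then (p.1, some vol) else s

def pvHMin (s q : Int × Int) : Int × Int := if q.2 < s.2 then q else s

def pvVM (p : Int × List Int) : Int × Int := (p.1, pvVol p.2)

lemma pvG_some (cs : List (Int × List Int)) (b w : Int) :
    cs.foldl pvG (b, some w)
      = (((cs.map pvVM).foldl pvHMin (b, w)).1, some ((cs.map pvVM).foldl pvHMin (b, w)).2) := by
  induction cs generalizing b w with
  | nil => simp
  | cons c cs ih =>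
    simp only [List.foldl_cons, List.map_cons]
    have : pvG (b, some w) c = (let r := pvHMin (b, w) (pvVM c); (r.1, some r.2)) := by
      simp [pvG, pvHMin, pvVM]
      split <;> rfl
    rw [this]
    exact ih _ _

lemma pvHMin_spec (l : List (Int × Int)) (s : Int × Int) :
    ∃ l1 l2, s :: l = l1 ++ (l.foldl pvHMin s) :: l2
      ∧ (∀ x ∈ l1, (l.foldl pvHMin s).2 < x.2)
      ∧ (∀ x ∈ s :: l, (l.foldl pvHMin s).2 ≤ x.2) := by
  induction l generalizing s with
  | nil => exact ⟨[], [], by simp, by simp, by simp⟩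
  | cons q l ih =>
    simp only [List.foldl_cons]
    by_cases h : q.2 < s.2
    · have hs : pvHMin s q = q := by simp [pvHMin, h]
      rw [hs]
      obtain ⟨l1, l2, hdec, hlt, hle⟩ := ih q
      refine ⟨s :: l1, l2, by simpa using hdec, ?_, ?_⟩
      · intro x hx
        rcases List.mem_cons.mp hx with rfl | hx
        · exact lt_of_le_of_lt (hle q (by simp)) h
        · exact hlt x hx
      · intro x hx
        rcases List.mem_cons.mp hx with rfl | hx
        · exact le_trans (hle q (by simp)) (le_of_lt h)
        · exact hle x hx
    · have hs : pvHMin s q = s := by simp [pvHMin, h]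
      rw [hs]
      obtain ⟨l1, l2, hdec, hlt, hle⟩ := ih s
      have h' : s.2 ≤ q.2 := by omega
      rcases l1 with _ | ⟨a, l1t⟩
      · simp only [List.nil_append, List.cons.injEq] at hdec
        obtain ⟨hr, hl⟩ := hdec
        subst hl
        refine ⟨[], q :: l, by simp [← hr], by simp, ?_⟩
        intro x hx
        rcases List.mem_cons.mp hx with rfl | hx
        · exact hle _ (by simp)
        · rcases List.mem_cons.mp hx with rfl | hx
          · exact le_trans (hle _ (by simp)) h'
          · exact hle _ (by simp [hx])
      · simp only [List.cons_append, List.cons.injEq] at hdec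
        obtain ⟨rfl, hl⟩ := hdec
        have hrs : (l.foldl pvHMin s).2 < s.2 := hlt s (by simp)
        refine ⟨s :: q :: l1t, l2,
          by rw [List.cons_append, List.cons_append, ← hl], ?_, ?_⟩
        · intro x hx
          rcases List.mem_cons.mp hx with rfl | hx
          · exact hrs
          · rcases List.mem_cons.mp hx with rfl | hx
            · exact lt_of_lt_of_le hrs h'
            · exact hlt x (by simp [hx])
        · intro x hx
          rcases List.mem_cons.mp hx with rfl | hx
          · exact hle x (by simp)
          · rcases List.mem_cons.mp hx with rfl | hx
            · exact le_trans (hle s (by simp)) h'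
            · exact hle x (by simp [hx])

lemma pvFits_eq (sp : List Int) (boxes : List (List Int)) :
    boxes.filter (fun b => pvFitB sp b) = (pvCands sp boxes).map (·.2) := by
  unfold pvCands
  conv_lhs => rw [← PySem.List.map_snd_enumerate boxes 0]
  rw [List.filter_map]
  rfl

lemma pvB_fold (sp : List Int) (boxes : List (List Int)) (init : Int × Option Int) :
    (PySem.List.enumerate boxes 0).foldl
      (fun (s : Int × Option Int) p =>
        if pvFitB sp p.2 then
          let vol := pvVol p.2
          match s.2 with
          | none => (p.1, some vol)
          | some w => if vol < w then (p.1, some vol) else s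
        else s) init
    = (pvCands sp boxes).foldl pvG init := by
  unfold pvCands
  generalize PySem.List.enumerate boxes 0 = l
  induction l generalizing init with
  | nil => rfl
  | cons p l ih =>
    by_cases h : pvFitB sp p.2
    · simp [h, ih, pvG]
    · simp [h, ih]

lemma pvFit_aux (sp sb : List Int) (h : sb.length ≤ sp.length) :
    ((PySem.List.enumerate sb 0).all (fun p => decide (PySem.List.pyGetD sp p.1 0 ≤ p.2)))
    = ((sp.zip sb).all (fun q => decide (q.1 ≤ q.2))) := by
  rw [Bool.eq_iff_iff]
  simp only [List.all_eq_true, decide_eq_true_eq]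
  have hlen : (sp.zip sb).length = sb.length := by rw [List.length_zip]; omega
  constructor
  · intro H q hq
    obtain ⟨i, hi, hget⟩ := List.mem_iff_getElem.mp hq
    rw [List.getElem_zip] at hget
    have hisb : i < sb.length := hlen ▸ hi
    have h2 := H ((0 : Int) + (i : Int), sb[i]) ((PySem.List.mem_enumerate_iff _ _ _).mpr ⟨i, hisb, rfl⟩)
    rw [← hget]
    simpa [List.getElem?_eq_getElem (by omega : i < sp.length)] using h2
  · intro H p hp
    obtain ⟨k, hk, rfl⟩ := (PySem.List.mem_enumerate_iff _ _ _).mp hp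
    have hq := H (sp[k], sb[k])
      (List.mem_iff_getElem.mpr ⟨k, by omega, by rw [List.getElem_zip]⟩)
    simpa [List.getElem?_eq_getElem (by omega : k < sp.length)] using hq

lemma pvFit_eq (sp box : List Int) (h : box.length ≤ sp.length) :
    ((PySem.List.enumerate (PySem.List.sorted box (fun x => x) false) 0).all
      (fun p => decide (PySem.List.pyGetD sp p.1 0 ≤ p.2))) = pvFitB sp box := by
  unfold pvFitB
  exact pvFit_aux sp _ (by rw [PySem.List.length_sorted]; exact h)

lemma pvEnum (xs : List (List Int)) (k : Nat) :
    (PySem.List.pyRange (k : Int) (xs.length : Int) 1).map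
      (fun j => (j, PySem.List.pyGetD xs j ([] : List Int)))
      = PySem.List.enumerate (xs.drop k) (k : Int) := by
  by_cases h : k < xs.length
  · rw [PySem.List.pyRange_one_cons (by exact_mod_cast h), List.map_cons,
      List.drop_eq_getElem_cons h, PySem.List.enumerate_cons]
    have h1 : ((k : Int) + 1) = ((k + 1 : Nat) : Int) := by push_cast; ring
    have h2 : PySem.List.pyGetD xs (k : Int) [] = xs[k] := by
      simp [List.getD_eq_getElem?_getD, List.getElem?_eq_getElem h]
    rw [h2, h1, pvEnum xs (k + 1)]
  · rw [PySem.List.pyRange_one_eq_nil (by exact_mod_cast Nat.le_of_not_lt h),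
      List.drop_eq_nil_of_le (Nat.le_of_not_lt h)]
    simp [PySem.List.enumerate]
termination_by xs.length - k

lemma pvSwap (l : List (Int × List Int)) (s : Int × Int) :
    l.foldl (fun (s : Int × Int) q => if pvVol q.2 < s.1 then (pvVol q.2, q.1) else s) s
      = (((l.map pvVM).foldl pvHMin s.swap).2, ((l.map pvVM).foldl pvHMin s.swap).1) := by
  induction l generalizing s with
  | nil => simp
  | cons q l ih =>
    simp only [List.foldl_cons, List.map_cons]
    rw [ih]
    have hst : (if pvVol q.2 < s.1 then (pvVol q.2, q.1) else s).swap = pvHMin s.swap (pvVM q) := by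
      rcases s with ⟨a, b⟩
      by_cases hc : pvVol q.2 < a
      · simp [pvHMin, pvVM, hc]
      · simp [pvHMin, pvVM, hc]
    rw [hst]

lemma pvGetElem_append {α : Type} (l1 l2 : List α) (x : α) :
    (l1 ++ x :: l2)[l1.length]'(by simp) = x := by
  rw [List.getElem_append_right (Nat.le_refl _)]; simp

lemma pvCands_mem (sp : List Int) (boxes : List (List Int)) (p : Int × List Int)
    (hp : p ∈ pvCands sp boxes) :
    ∃ j : Nat, ∃ hj : j < boxes.length, p = ((j : Int), boxes[j]) ∧ pvFitB sp boxes[j] = true := by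
  obtain ⟨hmem, hfit⟩ := List.mem_filter.mp hp
  obtain ⟨j, hj, rfl⟩ := (PySem.List.mem_enumerate_iff _ _ _).mp hmem
  exact ⟨j, hj, by simp, by simpa using hfit⟩

lemma pvCands_mem_of (sp : List Int) (boxes : List (List Int)) (j : Nat)
    (hj : j < boxes.length) (hfit : pvFitB sp boxes[j] = true) :
    ((j : Int), boxes[j]) ∈ pvCands sp boxes := by
  refine List.mem_filter.mpr ⟨(PySem.List.mem_enumerate_iff _ _ _).mpr ⟨j, hj, by simp⟩, by simpa⟩

lemma pvCands_pairwise (sp : List Int) (boxes : List (List Int)) :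
    (pvCands sp boxes).Pairwise (fun p q => p.1 < q.1) :=
  (PySem.List.pairwise_lt_enumerate boxes 0).filter _

lemma pvIndex (sp : List Int) (boxes : List (List Int)) (k : Nat)
    (hk : k < (pvCands sp boxes).length)
    (hmin : ∀ q : Nat, (_hq : q < k) → pvVol ((pvCands sp boxes)[k]'hk).2 < pvVol ((pvCands sp boxes)[q]'(by omega)).2) :
    ∃ j : Nat, ((pvCands sp boxes)[k]'hk).1 = (j : Int) ∧
      PySem.List.index? boxes ((pvCands sp boxes)[k]'hk).2 = some j := by
  obtain ⟨j, hj, hpk, hfit⟩ := pvCands_mem sp boxes _ (List.getElem_mem hk)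
  refine ⟨j, by rw [hpk], ?_⟩
  rw [hpk]
  have hne : ∀ i : Nat, (_hij : i < j) → boxes[i]'(by omega) ≠ boxes[j] := by
    intro i hij heq
    have hfi : pvFitB sp (boxes[i]'(by omega)) = true := by rw [heq]; exact hfit
    have hmem : ((i : Int), boxes[i]'(by omega)) ∈ pvCands sp boxes :=
      pvCands_mem_of sp boxes i (by omega) hfi
    obtain ⟨q, hq, hcq⟩ := List.mem_iff_getElem.mp hmem
    have hqk : q < k := by
      rcases Nat.lt_trichotomy q k with h | h | h
      · exact h
      · exfalso
        have e1 : (pvCands sp boxes)[q]? = some ((i : Int), boxes[i]'(by omega)) := by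
          rw [List.getElem?_eq_getElem hq, hcq]
        have e2 : (pvCands sp boxes)[k]? = some ((j : Int), boxes[j]) := by
          rw [List.getElem?_eq_getElem hk, hpk]
        rw [h, e2] at e1
        simp at e1
        omega
      · exfalso
        have := List.pairwise_iff_getElem.mp (pvCands_pairwise sp boxes) k q hk hq h
        rw [hpk, hcq] at this
        simp at this; omega
    have := hmin q hqk
    rw [hcq, hpk] at this
    simp only at this
    rw [heq] at this
    omega
  -- boxes = take j ++ boxes[j] :: drop (j+1), boxes[j] ∉ take j
  refine (PySem.List.index?_eq_some_iff _ _ _).mpr ⟨boxes.take j, boxes.drop (j+1), ?_, ?_, ?_⟩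
  · rw [← List.drop_eq_getElem_cons hj, List.take_append_drop]
  · simp [List.length_take]; omega
  · intro hmem
    obtain ⟨i, hi, hieq⟩ := List.mem_take_iff_getElem.mp hmem
    exact hne i (by omega) (by simpa using hieq)

lemma pvFM_le (a1 a2 b1 b2 : List (Int × Int)) (rA rB : Int × Int)
    (hvols : (a1 ++ rA :: a2).map (·.2) = (b1 ++ rB :: b2).map (·.2))
    (hAlt : ∀ x ∈ a1, rA.2 < x.2)
    (hBle : ∀ x ∈ b1 ++ rB :: b2, rB.2 ≤ x.2) :
    ¬ (b1.length < a1.length) := by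
  intro hlt
  have hlen : (a1 ++ rA :: a2).length = (b1 ++ rB :: b2).length := by
    have := congrArg List.length hvols; simpa using this
  have hpA : a1.length < (a1 ++ rA :: a2).length := by simp
  have hpB : b1.length < (b1 ++ rB :: b2).length := by simp
  have hv : ∀ i : Nat, (hi : i < (a1 ++ rA :: a2).length) →
      ((a1 ++ rA :: a2)[i]'hi).2 = ((b1 ++ rB :: b2)[i]'(by omega)).2 := by
    intro i hi
    have h2 := congrArg (fun l => l[i]?) hvols
    simp only [List.getElem?_map, List.getElem?_eq_getElem hi,
      List.getElem?_eq_getElem (show i < (b1 ++ rB :: b2).length by omega),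
      Option.map_some] at h2
    exact Option.some.injEq _ _ ▸ (by simpa using h2)
  have hBlen : b1.length < (a1 ++ rA :: a2).length := by omega
  -- rA.2 < value at position b1.length on the A side
  have h1 : rA.2 < ((a1 ++ rA :: a2)[b1.length]'hBlen).2 := by
    rw [List.getElem_append_left hlt]
    exact hAlt _ (List.getElem_mem hlt)
  -- that value equals rB.2
  have h2 : ((b1 ++ rB :: b2)[b1.length]'hpB) = rB := pvGetElem_append b1 b2 rB
  -- rB.2 ≤ rA.2 via position a1.length
  have h3 : ((a1 ++ rA :: a2)[a1.length]'hpA) = rA := pvGetElem_append a1 a2 rA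
  have h4 : rB.2 ≤ ((b1 ++ rB :: b2)[a1.length]'(by omega)).2 :=
    hBle _ (List.getElem_mem (by omega))
  have h5 := hv b1.length hBlen
  have h6 := hv a1.length hpA
  rw [h2] at h5
  rw [h3] at h6
  omega

lemma pvFM_eq (a1 a2 b1 b2 : List (Int × Int)) (rA rB : Int × Int)
    (hvols : (a1 ++ rA :: a2).map (·.2) = (b1 ++ rB :: b2).map (·.2))
    (hAlt : ∀ x ∈ a1, rA.2 < x.2) (hAle : ∀ x ∈ a1 ++ rA :: a2, rA.2 ≤ x.2)
    (hBlt : ∀ x ∈ b1, rB.2 < x.2) (hBle : ∀ x ∈ b1 ++ rB :: b2, rB.2 ≤ x.2) :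
    a1.length = b1.length := by
  have h1 := pvFM_le a1 a2 b1 b2 rA rB hvols hAlt hBle
  have h2 := pvFM_le b1 b2 a1 a2 rB rA hvols.symm hBlt hAle
  omega

-- A's min loop rewritten as a pvHMin fold over the enumerated tail of fits
lemma pvA_loop (fits : List (List Int)) (init : Int × Int) :
    (PySem.List.pyRange 1 (fits.length : Int) 1).foldl
      (fun (s : Int × Int) i =>
        let fi := PySem.List.pyGetD fits i []
        let volume := PySem.List.pyGetD fi 0 0 * PySem.List.pyGetD fi 1 0 * PySem.List.pyGetD fi 2 0
        if volume < s.1 then (volume, i) else s) init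
    = (((((PySem.List.enumerate (fits.drop 1) 1).map pvVM).foldl pvHMin init.swap)).2,
       ((((PySem.List.enumerate (fits.drop 1) 1).map pvVM).foldl pvHMin init.swap)).1) := by
  have h1 : (PySem.List.pyRange 1 (fits.length : Int) 1).foldl
      (fun (s : Int × Int) i =>
        let fi := PySem.List.pyGetD fits i []
        let volume := PySem.List.pyGetD fi 0 0 * PySem.List.pyGetD fi 1 0 * PySem.List.pyGetD fi 2 0
        if volume < s.1 then (volume, i) else s) init
      = ((PySem.List.pyRange 1 (fits.length : Int) 1).map
          (fun j => (j, PySem.List.pyGetD fits j ([] : List Int)))).foldl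
          (fun (s : Int × Int) q => if pvVol q.2 < s.1 then (pvVol q.2, q.1) else s) init := by
    exact (List.foldl_map
      (f := fun j => (j, PySem.List.pyGetD fits j ([] : List Int)))
      (g := fun (s : Int × Int) q => if pvVol q.2 < s.1 then (pvVol q.2, q.1) else s)).symm
  rw [h1]
  have h2 : (PySem.List.pyRange (1 : Int) (fits.length : Int) 1).map
      (fun j => (j, PySem.List.pyGetD fits j ([] : List Int)))
      = PySem.List.enumerate (fits.drop 1) (1 : Int) := by
    have h3 := pvEnum fits 1
    simpa using h3
  rw [h2]
  exact pvSwap _ _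

lemma pvVols_eq (l : List (Int × List Int)) (s : Int) :
    ((PySem.List.enumerate (l.map (fun x => x.2)) s).map pvVM).map (fun x => x.2)
      = (l.map pvVM).map (fun x => x.2) := by
  rw [List.map_map, List.map_map]
  have h1 : ((fun x : Int × Int => x.2) ∘ pvVM) = (fun p : Int × List Int => pvVol p.2) := rfl
  rw [h1]
  have h2 : (fun p : Int × List Int => pvVol p.2)
      = (pvVol ∘ (fun p : Int × List Int => p.2)) := rfl
  rw [h2, ← List.map_map, ← List.map_map, PySem.List.map_snd_enumerate]

-- decomposition form of pvIndex, matching what pvHMin_spec delivers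
lemma pvIndex' (sp : List Int) (boxes : List (List Int)) (l1 l2 : List (Int × List Int))
    (p : Int × List Int) (hdec : pvCands sp boxes = l1 ++ p :: l2)
    (hmin : ∀ x ∈ l1, pvVol p.2 < pvVol x.2) :
    ∃ j : Nat, p.1 = (j : Int) ∧ PySem.List.index? boxes p.2 = some j := by
  have hk : l1.length < (pvCands sp boxes).length := by rw [hdec]; simp
  have hpk : (pvCands sp boxes)[l1.length]'hk = p := by
    have h1 : (pvCands sp boxes)[l1.length]? = some p := by
      rw [hdec, List.getElem?_eq_getElem (by simp), pvGetElem_append]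
    rw [List.getElem?_eq_getElem hk] at h1
    exact Option.some.inj h1
  have hm : ∀ q : Nat, (_hq : q < l1.length) →
      pvVol ((pvCands sp boxes)[l1.length]'hk).2 < pvVol ((pvCands sp boxes)[q]'(by omega)).2 := by
    intro q hq
    have h2 : (pvCands sp boxes)[q]? = some (l1[q]'hq) := by
      rw [hdec, List.getElem?_append_left hq, List.getElem?_eq_getElem hq]
    rw [List.getElem?_eq_getElem (by omega : q < (pvCands sp boxes).length)] at h2
    rw [hpk, Option.some.inj h2]
    exact hmin _ (List.getElem_mem hq)
  obtain ⟨j, hj1, hj2⟩ := pvIndex sp boxes l1.length hk hm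
  rw [hpk] at hj1 hj2
  exact ⟨j, hj1, hj2⟩

-- ===== VERDICT (by name: the statement is the Claim_ definition above) =====
theorem packageBoxing_spec : Claim_equal_packageBoxing := by
  intro pkg boxes _hdom hpre
  unfold Spec_packageBoxing
  simp only [packageBoxing, packageBoxing_alt]
  have hfeq : (boxes.filter fun box =>
      (PySem.List.enumerate (PySem.List.sorted box (fun x => x) false) 0).all
        fun p => decide (PySem.List.pyGetD (PySem.List.sorted pkg (fun x => x) false) p.1 0 ≤ p.2))
      = (pvCands (PySem.List.sorted pkg (fun x => x) false) boxes).map (·.2) := by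
    rw [← pvFits_eq]
    refine List.filter_congr (fun b hb => pvFit_eq _ b ?_)
    rw [PySem.List.length_sorted]
    exact (hpre b hb).1
  rw [hfeq, pvB_fold]
  generalize PySem.List.sorted pkg (fun x => x) false = sp at *
  rcases hc : pvCands sp boxes with _ | ⟨c, cs⟩
  · simp
  · rcases cs with _ | ⟨c2, cs'⟩
    · -- exactly one fitting box
      obtain ⟨j, hj1, hj2⟩ := pvIndex' sp boxes [] [] c (by simpa using hc) (by simp)
      simp only [List.map_cons, List.map_nil, List.length_cons, List.length_nil,
        List.foldl_cons, List.foldl_nil]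
      norm_num
      rw [PySem.List.index?_eq_idxOf?] at hj2
      rw [hj2]
      simp [pvG, hj1]
    · -- at least two fitting boxes
      rw [if_neg (by simp), if_neg (by simp), pvA_loop]
      simp only [List.map_cons, PySem.List.pyGetD_zero_cons, List.drop_one, List.tail_cons,
        Prod.swap_prod_mk]
      conv_rhs => rw [List.foldl_cons]
      rw [show pvG (-1, none) c = (c.1, some (pvVol c.2)) from rfl, pvG_some]
      rw [show (PySem.List.pyGetD c.2 0 0 * PySem.List.pyGetD c.2 1 0 * PySem.List.pyGetD c.2 2 0)
        = pvVol c.2 from rfl]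
      obtain ⟨a1, a2, hAdec, hAlt, hAle⟩ :=
        pvHMin_spec ((PySem.List.enumerate (c2.2 :: List.map (fun x => x.2) cs') 1).map pvVM)
          ((0 : Int), pvVol c.2)
      obtain ⟨b1, b2, hBdec, hBlt, hBle⟩ := pvHMin_spec ((c2 :: cs').map pvVM) (c.1, pvVol c.2)
      set rA := (((PySem.List.enumerate (c2.2 :: List.map (fun x => x.2) cs') 1).map pvVM).foldl
        pvHMin ((0 : Int), pvVol c.2)) with hrA
      set rB := (((c2 :: cs').map pvVM).foldl pvHMin (c.1, pvVol c.2)) with hrB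
      -- the two volume sequences coincide
      have hvols : ((((0 : Int), pvVol c.2) ::
            (PySem.List.enumerate (c2.2 :: List.map (fun x => x.2) cs') 1).map pvVM).map (fun x => x.2))
          = (((c.1, pvVol c.2) :: (c2 :: cs').map pvVM).map (fun x => x.2)) := by
        simp only [List.map_cons]
        congr 1
        exact pvVols_eq (c2 :: cs') 1
      have hvols' : (a1 ++ rA :: a2).map (fun x => x.2) = (b1 ++ rB :: b2).map (fun x => x.2) := by
        rw [← hAdec, ← hBdec]; exact hvols
      have hAle' : ∀ x ∈ a1 ++ rA :: a2, rA.2 ≤ x.2 := fun x hx => hAle x (hAdec ▸ hx)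
      have hBle' : ∀ x ∈ b1 ++ rB :: b2, rB.2 ≤ x.2 := fun x hx => hBle x (hBdec ▸ hx)
      have hk : a1.length = b1.length := pvFM_eq a1 a2 b1 b2 rA rB hvols' hAlt hAle' hBlt hBle'
      -- pull the B-side decomposition back to the candidate list
      have hLB : (c :: c2 :: cs').map pvVM = b1 ++ rB :: b2 := by
        rw [List.map_cons, show pvVM c = (c.1, pvVol c.2) from rfl]; exact hBdec
      obtain ⟨u1, rest, hu, hu1, hrest⟩ := List.map_eq_append_iff.mp hLB
      obtain ⟨pc, u2, hrest2, hpc, hu2⟩ := List.map_eq_cons_iff.mp hrest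
      have hcdec : pvCands sp boxes = u1 ++ pc :: u2 := by rw [hc, hu, hrest2]
      have hminu : ∀ x ∈ u1, pvVol pc.2 < pvVol x.2 := by
        intro x hx
        have hmem : pvVM x ∈ b1 := hu1 ▸ List.mem_map_of_mem hx
        have h3 := hBlt _ hmem
        simpa [pvVM, ← hpc] using h3
      obtain ⟨j, hj1, hj2⟩ := pvIndex' sp boxes u1 u2 pc hcdec hminu
      -- pull the A-side decomposition back to the enumerated fits list
      have hLA : (PySem.List.enumerate (c.2 :: c2.2 :: List.map (fun x => x.2) cs') 0).map pvVM
          = a1 ++ rA :: a2 := by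
        rw [PySem.List.enumerate_cons, List.map_cons]
        norm_num
        exact hAdec
      obtain ⟨e1, restA, hAu, hAe1, hArest⟩ := List.map_eq_append_iff.mp hLA
      obtain ⟨pe, e2, hArest2, hApe, hAe2⟩ := List.map_eq_cons_iff.mp hArest
      have hEdec : PySem.List.enumerate (c.2 :: c2.2 :: List.map (fun x => x.2) cs') 0
          = e1 ++ pe :: e2 := by rw [hAu, hArest2]
      have hlenA : e1.length = a1.length := by
        have := congrArg List.length hAe1; simpa using this
      have hlenB : u1.length = b1.length := by
        have := congrArg List.length hu1; simpa using this
      have hlenf : e1.length < (c.2 :: c2.2 :: List.map (fun x => x.2) cs').length := by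
        have h9 := congrArg List.length hEdec
        rw [PySem.List.length_enumerate] at h9
        simp only [List.length_append, List.length_cons] at h9
        simp only [List.length_cons]
        omega
      have hpe : pe = ((e1.length : Int),
          (c.2 :: c2.2 :: List.map (fun x => x.2) cs')[e1.length]'hlenf) := by
        have h4 : (PySem.List.enumerate (c.2 :: c2.2 :: List.map (fun x => x.2) cs') 0)[e1.length]?
            = some pe := by
          rw [hEdec, List.getElem?_eq_getElem (by simp), pvGetElem_append]
        rw [List.getElem?_eq_getElem (by simpa [PySem.List.length_enumerate] using hlenf),
          PySem.List.getElem_enumerate] at h4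
        have h5 := Option.some.inj h4
        rw [← h5]
        norm_num
      have hrA1 : rA.1 = ((e1.length : Nat) : Int) := by
        rw [← hApe, hpe]
        rfl
      -- the fits list decomposes at the same position
      have hfits_dec : (c.2 :: c2.2 :: List.map (fun x => x.2) cs')
          = u1.map (fun x => x.2) ++ pc.2 :: u2.map (fun x => x.2) := by
        have h6 : (c :: c2 :: cs') = u1 ++ pc :: u2 := by rw [hu, hrest2]
        calc (c.2 :: c2.2 :: List.map (fun x => x.2) cs')
            = (c :: c2 :: cs').map (fun x => x.2) := rfl
          _ = (u1 ++ pc :: u2).map (fun x => x.2) := by rw [h6]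
          _ = u1.map (fun x => x.2) ++ pc.2 :: u2.map (fun x => x.2) := by simp
      have hfitsk : PySem.List.pyGetD (c.2 :: c2.2 :: List.map (fun x => x.2) cs') rA.1 [] = pc.2 := by
        rw [hrA1, PySem.List.pyGetD_natCast, hfits_dec]
        have h7 : e1.length = (u1.map (fun x => x.2)).length := by simp; omega
        rw [h7, List.getD_eq_getElem _ _ (by simp), pvGetElem_append]
      rw [hfitsk, PySem.List.index?_eq_idxOf?] at *
      rw [hj2]
      simp only [Option.getD_some]
      have h8 : rB.1 = pc.1 := by rw [← hpc]; rfl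
      rw [h8, hj1]
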